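-- pv_equiv track=rewrite | github.com/JTorresTMP/CodeWars | Kyu8/Draw_Stairs.py | draw_stairs
-- ===== SOURCE A (Python) =====
-- def draw_stairs(n):
--     arr = ['I\n' for x in range(n - 1)]
--     arr.append('I')
--     space = 0
--     narr = []
--     for i in arr:
--         i = (' ' * space) + i
--         space += 1
--         narr.append(i)
--     return ''.join(narr)
-- ===== SOURCE B (Python) =====
-- def draw_stairs(n):
--     # divide and conquer: a k-line staircase is the top half staircase,
--     # then the bottom half staircase indented as a whole block.
--     def stair(k):
--         if k == 1:
--             return 'I'
--         h = k // 2
--         pad = ' ' * h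
--         return stair(h) + '\n' + pad + stair(k - h).replace('\n', '\n' + pad)
--     return stair(max(n, 1))
-- ===== Notes on version B (the rewrite author's own statement) =====
-- stated objective: alternative
-- what changed: Replaces A's two-phase build (a list of stair pieces, then a loop prepending a growing number of spaces to each line and joining) with a divide-and-conquer construction: a k-line staircase is the top half staircase followed by the bottom half staircase indented as a whole block with a single string replace; no per-line space-counting occurs.
import Mathlib
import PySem

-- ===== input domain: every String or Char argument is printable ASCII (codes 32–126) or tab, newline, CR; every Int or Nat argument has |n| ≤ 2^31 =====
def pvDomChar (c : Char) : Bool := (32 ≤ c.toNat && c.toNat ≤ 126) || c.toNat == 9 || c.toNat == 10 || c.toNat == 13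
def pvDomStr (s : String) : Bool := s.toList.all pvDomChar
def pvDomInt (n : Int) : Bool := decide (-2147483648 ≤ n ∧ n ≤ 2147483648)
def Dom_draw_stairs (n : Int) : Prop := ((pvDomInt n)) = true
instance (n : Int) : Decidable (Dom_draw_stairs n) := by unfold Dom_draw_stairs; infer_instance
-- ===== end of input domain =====

-- B builds the staircase by divide and conquer (top half + bottom half indented as a
-- block via replace), instead of A's list-of-'I\n'-pieces and per-line space-prepending
-- loop; an alternative algorithm, not claimed faster.


-- ===== PORT A =====
-- strings are carried as List Char (PySem.Chars level); the result is wrapped with String.ofList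
def draw_stairs (n : Int) : String :=
  -- arr = ['I\n' for x in range(n-1)] + ['I']; then the space-prepending loop; ''.join
  String.ofList (PySem.Chars.join []
    ((((PySem.List.pyRange 0 (n - 1) 1).map (fun _ => (['I', '\n'] : List Char))) ++ [['I']]).foldl
      (fun (st : Int × List (List Char)) i =>
        (st.1 + 1, st.2 ++ [PySem.List.pyRepeat [' '] st.1 ++ i]))
      (0, [])).2)

-- ===== PORT B =====
-- stair(k), B's inner divide-and-conquer helper; only ever called with k ≥ 1
-- (Python tests 'k == 1'; the Lean guard 'k ≤ 1' only makes the recursion total at the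
-- never-reached argument 0).  bot.replace('\n', '\n' + pad) is PySem.Chars.replace.
def drawStairsGo : Nat → List Char
  | k =>
    if _h : k ≤ 1 then ['I']
    else
      drawStairsGo (k / 2) ++ '\n' ::
        (List.replicate (k / 2) ' ' ++
          PySem.Chars.replace (drawStairsGo (k - k / 2)) ['\n'] ('\n' :: List.replicate (k / 2) ' '))
  decreasing_by all_goals omega

def draw_stairs_alt (n : Int) : String :=
  String.ofList (drawStairsGo (max n 1).toNat)

-- ===== PRECONDITION & SPEC =====
def Spec_draw_stairs (n : Int) (out : String) : Prop := out = draw_stairs_alt n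
instance (n : Int) (out : String) : Decidable (Spec_draw_stairs n out) := by unfold Spec_draw_stairs; infer_instance

-- ===== CLAIM (what is proved, stated in full; the proofs are below) =====
def Claim_equal_draw_stairs : Prop := ∀ (n : Int), Dom_draw_stairs n → Spec_draw_stairs n (draw_stairs n)

-- ===== LEMMAS AND PROOFS =====

-- line j of the staircase
def stairLine (j : Nat) : List Char := List.replicate j ' ' ++ ['I']

-- lines a, a+1, …, a+b-1 joined with '\n'
def stairSeg : Nat → Nat → List Char
  | _, 0 => []
  | a, 1 => stairLine a
  | a, (b + 2) => stairLine a ++ '\n' :: stairSeg (a + 1) (b + 1)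

-- the character map performed by replace('\n', '\n' + ' '*p)
def indentChar (p : Nat) (c : Char) : List Char :=
  if c = '\n' then '\n' :: List.replicate p ' ' else [c]

-- joining on the empty separator is flattening
theorem join_nil_eq_flatten (cs : List (List Char)) :
    PySem.Chars.join [] cs = cs.flatten := by
  induction cs with
  | nil => rfl
  | cons h t ih =>
    cases t with
    | nil => simp [PySem.Chars.join, List.intercalate]
    | cons b t' => rw [PySem.Chars.join_cons_cons]; simp_all

-- A's space-prepending loop, characterised (counter starts at s ≥ 0)
theorem foldA (m : Nat) (s : Int) (hs : 0 ≤ s) (acc : List (List Char)) :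
    (List.replicate m (['I', '\n']) ++ [['I']]).foldl
      (fun (st : Int × List (List Char)) i =>
        (st.1 + 1, st.2 ++ [PySem.List.pyRepeat [' '] st.1 ++ i]))
      (s, acc)
    = (s + m + 1,
       acc ++ (List.range m).map (fun k => List.replicate (s.toNat + k) ' ' ++ ['I', '\n'])
           ++ [List.replicate (s.toNat + m) ' ' ++ ['I']]) := by
  induction m generalizing s acc with
  | zero => simp [PySem.List.pyRepeat_singleton]
  | succ m ih =>
    rw [List.replicate_succ]
    simp only [List.cons_append, List.foldl_cons]
    rw [ih (s + 1) (by omega)]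
    rw [List.range_succ_eq_map]
    simp only [List.map_cons, List.map_map, PySem.List.pyRepeat_singleton]
    have h0 : (s + 1).toNat = s.toNat + 1 := by omega
    rw [Prod.mk.injEq]
    refine ⟨by push_cast; ring, ?_⟩
    simp [h0, Function.comp, Nat.add_comm, Nat.add_left_comm, List.append_assoc]

-- replace with a single-character pattern is a flatMap over the characters
theorem replaceGo_singleton (c0 : Char) (new : List Char) :
    ∀ (l : List Char) (fuel : Nat), l.length ≤ fuel → ∀ (acc : List Char),
      PySem.Chars.replace.go [c0] new fuel l acc
        = acc.reverse ++ l.flatMap (fun c => if c = c0 then new else [c]) := by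
  intro l
  induction l with
  | nil =>
    intro fuel _ acc
    cases fuel <;> simp [PySem.Chars.replace.go]
  | cons c t ih =>
    intro fuel hf acc
    cases fuel with
    | zero => simp at hf
    | succ f =>
      rw [PySem.Chars.replace.go]
      by_cases hc : c = c0
      · have hp : List.isPrefixOf [c0] (c :: t) = true := by
          simp [List.isPrefixOf, hc]
        simp only [hc]
        rw [show List.drop (List.length [c0]) (c0 :: t) = t from rfl]
        rw [ih f (by simpa using hf) (new.reverse ++ acc)]
        simp
      · have hp : List.isPrefixOf [c0] (c :: t) = false := by
          simp [List.isPrefixOf]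
          exact fun h => absurd h.symm hc
        simp only [hp]
        rw [if_neg (by simp)]
        rw [ih f (by simpa using hf) (c :: acc)]
        simp [hc]

theorem replace_singleton (c0 : Char) (new l : List Char) :
    PySem.Chars.replace l [c0] new
      = l.flatMap (fun c => if c = c0 then new else [c]) := by
  rw [PySem.Chars.replace]
  simp only [List.isEmpty_cons, Bool.false_eq_true, if_false]
  exact replaceGo_singleton c0 new l l.length le_rfl []

-- two adjacent segments joined by a newline merge
theorem stairSeg_merge (b : Nat) (hb : 1 ≤ b) : ∀ (a c : Nat), 1 ≤ c →
    stairSeg a b ++ '\n' :: stairSeg (a + b) c = stairSeg a (b + c) := by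
  induction b with
  | zero => omega
  | succ b ih =>
    intro a c hc
    cases b with
    | zero =>
      cases c with
      | zero => omega
      | succ c =>
        rw [show 1 + (c + 1) = c + 1 + 1 from by omega]
        simp [stairSeg]
    | succ b =>
      have hih := ih (by omega) (a + 1) c hc
      rw [show a + 1 + (b + 1) = a + (b + 1 + 1) from by omega] at hih
      rw [show b + 1 + c = b + c + 1 from by omega] at hih
      rw [show b + 1 + 1 + c = b + c + 2 from by omega]
      simp only [stairSeg]
      rw [← hih]
      simp

-- indenting a segment by p spaces (via the replace map, plus the explicit pad) shifts it
theorem stairSeg_indent (b : Nat) (hb : 1 ≤ b) : ∀ (a p : Nat),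
    List.replicate p ' ' ++ (stairSeg a b).flatMap (indentChar p) = stairSeg (a + p) b := by
  induction b with
  | zero => omega
  | succ b ih =>
    intro a p
    cases b with
    | zero =>
      simp only [stairSeg, stairLine, List.flatMap_append]
      have h1 : (List.replicate a ' ').flatMap (indentChar p) = List.replicate a ' ' := by
        induction a with
        | zero => rfl
        | succ a iha => simp [List.replicate_succ, indentChar, iha]
      have h2 : (['I'] : List Char).flatMap (indentChar p) = ['I'] := by
        simp [indentChar, List.flatMap]
      rw [h1, h2, ← List.append_assoc, ← List.replicate_add, Nat.add_comm p a]
    | succ b =>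
      simp only [stairSeg, stairLine, List.flatMap_append, List.flatMap_cons, List.flatMap_nil]
      have h1 : (List.replicate a ' ').flatMap (indentChar p) = List.replicate a ' ' := by
        induction a with
        | zero => rfl
        | succ a iha => simp [List.replicate_succ, indentChar, iha]
      have h3 : indentChar p '\n' = '\n' :: List.replicate p ' ' := by simp [indentChar]
      have hI : indentChar p 'I' = ['I'] := by simp [indentChar]
      rw [h1, h3, hI]
      have hih := ih (by omega) (a + 1) p
      rw [show a + 1 + p = a + p + 1 from by omega] at hih
      rw [← hih,
        show (List.replicate (a + p) ' ' : List Char)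
            = List.replicate p ' ' ++ List.replicate a ' ' from by
          rw [← List.replicate_add, Nat.add_comm]]
      simp [List.append_assoc]
      rw [← List.append_assoc, ← List.replicate_add]

-- B's divide-and-conquer helper produces the staircase segment starting at line 0
theorem drawStairsGo_eq (k : Nat) (hk : 1 ≤ k) : drawStairsGo k = stairSeg 0 k := by
  induction k using Nat.strong_induction_on with
  | _ k ih =>
    rw [drawStairsGo]
    by_cases h1 : k ≤ 1
    · have : k = 1 := by omega
      subst this
      simp [stairSeg, stairLine]
    · rw [dif_neg h1]
      have hh : 1 ≤ k / 2 := by omega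
      have hr : 1 ≤ k - k / 2 := by omega
      rw [ih (k / 2) (by omega) hh, ih (k - k / 2) (by omega) hr]
      rw [replace_singleton]
      have hind := stairSeg_indent (k - k / 2) hr 0 (k / 2)
      rw [Nat.zero_add] at hind
      have : (fun c => if c = '\n' then '\n' :: List.replicate (k / 2) ' ' else [c])
          = indentChar (k / 2) := by
        funext c; simp [indentChar]
      rw [this, hind]
      have hm := stairSeg_merge (k / 2) hh 0 (k - k / 2) hr
      rw [Nat.zero_add] at hm
      rw [hm, show k / 2 + (k - k / 2) = k from by omega]

-- A's flattened line list is the staircase segment with m+1 lines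
theorem flattenForm_eq (m : Nat) :
    ((List.range m).map (fun k => List.replicate k ' ' ++ ['I', '\n'])).flatten
        ++ (List.replicate m ' ' ++ ['I'])
      = stairSeg 0 (m + 1) := by
  induction m with
  | zero => simp [stairSeg, stairLine]
  | succ m ih =>
    rw [List.range_succ, List.map_append, List.flatten_append]
    have hline : (List.replicate m ' ' ++ ['I', '\n'] : List Char)
        = stairLine m ++ ['\n'] := by simp [stairLine]
    have : ((List.range m).map (fun k => List.replicate k ' ' ++ ['I', '\n'])).flatten
        ++ (stairLine m ++ ['\n']) ++ (List.replicate (m + 1) ' ' ++ ['I'])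
        = stairSeg 0 (m + 1 + 1) := by
      have hm := stairSeg_merge (m + 1) (by omega) 0 1 (by omega)
      rw [Nat.zero_add] at hm
      rw [← hm, ← ih]
      simp [stairSeg, stairLine, List.append_assoc]
    simpa [hline, List.append_assoc] using this

theorem draw_stairs_eq_alt (n : Int) : draw_stairs n = draw_stairs_alt n := by
  unfold draw_stairs draw_stairs_alt
  have hA : (PySem.List.pyRange 0 (n - 1) 1).map (fun _ => (['I', '\n'] : List Char))
      = List.replicate (n - 1).toNat (['I', '\n']) := by
    by_cases h : n - 1 ≤ 0
    · rw [PySem.List.pyRange_one_eq_nil h]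
      simp [show (n - 1).toNat = 0 from by omega]
    · rw [show (n - 1) = (((n - 1).toNat : Nat) : Int) from by omega,
        PySem.List.pyRange_zero_natCast]
      simp [List.map_map, List.eq_replicate_iff]
  rw [hA, foldA (n - 1).toNat 0 le_rfl []]
  simp only [Int.toNat_zero, Nat.zero_add, List.nil_append]
  rw [join_nil_eq_flatten, List.flatten_append, List.flatten_cons, List.flatten_nil,
    List.append_nil]
  rw [flattenForm_eq ((n - 1).toNat)]
  rw [drawStairsGo_eq (max n 1).toNat (by omega)]
  rw [show (max n 1).toNat = (n - 1).toNat + 1 from by omega]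

-- ===== VERDICT (by name: the statement is the Claim_ definition above) =====
theorem draw_stairs_spec : Claim_equal_draw_stairs := by
  intro n _
  exact draw_stairs_eq_alt n
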